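-- pv_equiv track=rewrite | github.com/SimonKitSangChu/pAbT5 | pabt5/dataset.py | get_cdr_ids
-- ===== SOURCE A (Python) =====
-- from typing import Union, List, Optional, Dict, Any, Tuple, Set, Iterable
--
-- def get_cdr_ids(gapped_sequence: str, is_heavy: bool) -> List[List[int]]:
--     if is_heavy:
--         loop_spans = ((32, 42), (57, 76), (109, 138))
--     else:
--         loop_spans = ((24, 42), (58, 72), (107, 138))
--
--     resid = i_loop = 0
--     loop_ids = [[] for _ in loop_spans]
--
--     for i, aa in enumerate(gapped_sequence, 1):
--         resid += aa != '-'
--         if loop_spans[i_loop][0] <= i <= loop_spans[i_loop][1] and aa != '-':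
--             loop_ids[i_loop].append(resid)
--         if i == loop_spans[i_loop][1]:
--             i_loop += 1
--         if i_loop == len(loop_spans):
--             break
--
--     return loop_ids
-- ===== SOURCE B (Python) =====
-- def get_cdr_ids(gapped_sequence: str, is_heavy: bool):
--     loop_spans = ((32, 42), (57, 76), (109, 138)) if is_heavy else ((24, 42), (58, 72), (107, 138))
--     index = []
--     resid = 0
--     for pos, aa in enumerate(gapped_sequence, 1):
--         if aa != '-':
--             resid += 1
--             index.append((pos, resid))
--     return [[r for pos, r in index if lo <= pos <= hi] for lo, hi in loop_spans]
-- ===== Notes on version B (the rewrite author's own statement) =====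
-- stated objective: simpler
-- what changed: Replaced A's sequential span-pointer state machine (resid/i_loop mutable state with an early break) by an index-then-filter decomposition: one pass builds a (position, resid) index of non-gap residues, then each span's list is a filter over that index.
import Mathlib
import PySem

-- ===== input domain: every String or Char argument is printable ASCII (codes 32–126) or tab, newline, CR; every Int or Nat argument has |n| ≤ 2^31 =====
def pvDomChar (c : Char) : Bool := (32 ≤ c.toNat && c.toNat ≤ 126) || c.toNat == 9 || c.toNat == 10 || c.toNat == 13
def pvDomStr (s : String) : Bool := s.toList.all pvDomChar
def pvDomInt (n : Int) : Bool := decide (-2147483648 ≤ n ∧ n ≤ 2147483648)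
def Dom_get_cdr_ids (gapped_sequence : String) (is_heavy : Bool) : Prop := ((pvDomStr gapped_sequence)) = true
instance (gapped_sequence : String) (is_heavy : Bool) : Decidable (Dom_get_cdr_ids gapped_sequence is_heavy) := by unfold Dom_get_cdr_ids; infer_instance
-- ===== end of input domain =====

-- B replaces A's span-pointer state machine by an index-then-filter decomposition (objective: simpler).

-- ===== PORT A =====
-- A's for-loop over enumerate(gapped_sequence, 1) with mutable resid / i_loop / loop_ids and an
-- early break once i_loop == len(loop_spans).  'spans.getD i_loop (0,0)' totalises Python's
-- 'loop_spans[i_loop]' (the break guarantees i_loop < 3 whenever Python indexes, so the default is never hit).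
def aGo (spans : List (Int × Int)) : List Char → Int → Int → Nat → List (List Int) → List (List Int)
  | [], _, _, _, ids => ids
  | c :: rest, i, resid, i_loop, ids =>
    let resid' := resid + (if c ≠ '-' then 1 else 0)
    let sp := spans.getD i_loop (0, 0)
    let ids' := if sp.1 ≤ i ∧ i ≤ sp.2 ∧ c ≠ '-' then ids.modify i_loop (fun l => l ++ [resid']) else ids
    let i_loop' := if i = sp.2 then i_loop + 1 else i_loop
    if i_loop' = spans.length then ids' else aGo spans rest (i + 1) resid' i_loop' ids'

def get_cdr_ids (gapped_sequence : String) (is_heavy : Bool) : List (List Int) :=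
  let loop_spans : List (Int × Int) :=
    if is_heavy then [(32, 42), (57, 76), (109, 138)] else [(24, 42), (58, 72), (107, 138)]
  aGo loop_spans gapped_sequence.toList 1 0 0 (loop_spans.map (fun _ => []))

-- ===== PORT B =====
-- one pass building the (position, resid) index of non-gap characters
def bIndex : List Char → Int → Int → List (Int × Int)
  | [], _, _ => []
  | c :: rest, pos, resid =>
    if c ≠ '-' then (pos, resid + 1) :: bIndex rest (pos + 1) (resid + 1)
    else bIndex rest (pos + 1) resid

def get_cdr_ids_alt (gapped_sequence : String) (is_heavy : Bool) : List (List Int) :=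
  let loop_spans : List (Int × Int) :=
    if is_heavy then [(32, 42), (57, 76), (109, 138)] else [(24, 42), (58, 72), (107, 138)]
  let index := bIndex gapped_sequence.toList 1 0
  loop_spans.map (fun sp => ((index.filter (fun p => sp.1 ≤ p.1 ∧ p.1 ≤ sp.2)).map Prod.snd))

-- ===== PRECONDITION & SPEC =====
def Spec_get_cdr_ids (gapped_sequence : String) (is_heavy : Bool) (out : List (List Int)) : Prop := out = get_cdr_ids_alt gapped_sequence is_heavy
instance (gapped_sequence : String) (is_heavy : Bool) (out : List (List Int)) : Decidable (Spec_get_cdr_ids gapped_sequence is_heavy out) := by unfold Spec_get_cdr_ids; infer_instance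

-- ===== CLAIM (what is proved, stated in full; the proofs are below) =====
def Claim_equal_get_cdr_ids : Prop := ∀ (gapped_sequence : String) (is_heavy : Bool), Dom_get_cdr_ids gapped_sequence is_heavy → Spec_get_cdr_ids gapped_sequence is_heavy (get_cdr_ids gapped_sequence is_heavy)

-- ===== LEMMAS AND PROOFS =====

-- every position recorded in the index is ≥ the starting position
lemma bIndex_pos : ∀ (chars : List Char) (i resid : Int) (p : Int × Int),
    p ∈ bIndex chars i resid → i ≤ p.1 := by
  intro chars
  induction chars with
  | nil => intro i resid p h; simp [bIndex] at h
  | cons c rest ih =>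
    intro i resid p h
    simp only [bIndex] at h
    split at h
    · rcases List.mem_cons.mp h with h | h
      · subst h; simp
      · have := ih (i + 1) _ p h; omega
    · have := ih (i + 1) _ p h; omega

-- a span entirely below every index position filters to nothing
lemma filter_empty_of_hi_lt (chars : List Char) (i resid : Int) (sp : Int × Int)
    (h : sp.2 < i) :
    (bIndex chars i resid).filter (fun p => decide (sp.1 ≤ p.1 ∧ p.1 ≤ sp.2)) = [] := by
  apply List.filter_eq_nil_iff.mpr
  intro p hp
  have := bIndex_pos chars i resid p hp
  simp only [decide_eq_true_eq, not_and]
  intro _; omega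

-- zipWith where f returns the left element unchanged
lemma zipWith_left {α β : Type} (f : α → β → α) :
    ∀ (xs : List α) (ys : List β), xs.length = ys.length →
    (∀ x ∈ xs, ∀ y ∈ ys, f x y = x) → List.zipWith f xs ys = xs := by
  intro xs
  induction xs with
  | nil => intro ys _ _; simp
  | cons x xs ih =>
    intro ys hlen hf
    cases ys with
    | nil => simp at hlen
    | cons y ys =>
      simp only [List.zipWith]
      rw [hf x (by simp) y (by simp), ih ys (by simpa using hlen)]
      intro a ha b hb; exact hf a (by simp [ha]) b (by simp [hb])

-- the high ends of the spans are monotone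
lemma hi_mono (spans : List (Int × Int))
    (hlohi : ∀ j, j < spans.length → (spans.getD j (0,0)).1 ≤ (spans.getD j (0,0)).2)
    (hmono : ∀ j, j + 1 < spans.length → (spans.getD j (0,0)).2 < (spans.getD (j+1) (0,0)).1) :
    ∀ a b, a ≤ b → b < spans.length → (spans.getD a (0,0)).2 ≤ (spans.getD b (0,0)).2 := by
  intro a b
  induction b with
  | zero => intro hab _; interval_cases a; omega
  | succ n ih =>
    intro hab hlt
    rcases Nat.lt_or_ge a (n+1) with h | h
    · have h1 := ih (by omega) (by omega)
      have h2 := hmono n hlt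
      have h3 := hlohi (n+1) hlt
      omega
    · have : a = n + 1 := by omega
      subst this; omega

-- once every span's high end is below every index position, nothing more is appended
lemma zip_all_empty (spans : List (Int × Int)) (chars : List Char) (i resid : Int)
    (ids : List (List Int)) (hlen : ids.length = spans.length)
    (h : ∀ j, j < spans.length → (spans.getD j (0,0)).2 < i) :
    List.zipWith (fun l sp =>
        l ++ ((bIndex chars i resid).filter (fun p => sp.1 ≤ p.1 ∧ p.1 ≤ sp.2)).map Prod.snd)
      ids spans = ids := by
  apply zipWith_left _ ids spans hlen
  intro x _ y hy
  obtain ⟨j, hj, hy'⟩ := List.mem_iff_getElem.mp hy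
  have hhj : (spans.getD j (0,0)).2 < i := h j hj
  rw [List.getD_eq_getElem _ _ hj] at hhj
  rw [← hy', filter_empty_of_hi_lt chars i resid _ hhj]
  simp

-- main invariant lemma: the state machine equals pointwise append of the filtered index
lemma aGo_eq (spans : List (Int × Int))
    (hlohi : ∀ j, j < spans.length → (spans.getD j (0,0)).1 ≤ (spans.getD j (0,0)).2)
    (hmono : ∀ j, j + 1 < spans.length → (spans.getD j (0,0)).2 < (spans.getD (j+1) (0,0)).1) :
    ∀ (chars : List Char) (i resid : Int) (i_loop : Nat) (ids : List (List Int)),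
    ids.length = spans.length →
    i_loop ≤ spans.length →
    1 ≤ i →
    (∀ j, j < i_loop → (spans.getD j (0,0)).2 < i) →
    (i_loop < spans.length → i ≤ (spans.getD i_loop (0,0)).2) →
    aGo spans chars i resid i_loop ids =
      List.zipWith (fun l sp =>
          l ++ ((bIndex chars i resid).filter (fun p => sp.1 ≤ p.1 ∧ p.1 ≤ sp.2)).map Prod.snd)
        ids spans := by
  intro chars
  induction chars with
  | nil =>
    intro i resid i_loop ids hlen hle hi1 hpast hcur
    simp only [aGo, bIndex, List.filter_nil, List.map_nil, List.append_nil]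
    exact (zipWith_left _ ids spans hlen (by intro x _ y _; rfl)).symm
  | cons c rest ih =>
    intro i resid i_loop ids hlen hle hi1 hpast hcur
    by_cases hloopfull : i_loop = spans.length
    · -- the pointer already ran past the last span: A returns ids and every filter is empty
      have hsp : spans.getD i_loop ((0:Int),(0:Int)) = (0,0) :=
        List.getD_eq_default _ _ (le_of_eq hloopfull.symm)
      have hall : ∀ j, j < spans.length → (spans.getD j (0,0)).2 < i := by
        intro j hj; exact hpast j (hloopfull ▸ hj)
      simp only [aGo, hsp]
      rw [if_neg (show ¬(((0:Int),(0:Int)).1 ≤ i ∧ i ≤ ((0:Int),(0:Int)).2 ∧ c ≠ '-') from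
            fun h => by have h1 := h.2.1; simp at h1; omega)]
      rw [if_neg (show ¬(i = ((0:Int),(0:Int)).2) from by simp; omega)]
      rw [if_pos hloopfull]
      exact (zip_all_empty spans (c :: rest) i resid ids hlen hall).symm
    · have hloop : i_loop < spans.length := Nat.lt_of_le_of_ne hle hloopfull
      have hcur' : i ≤ (spans.getD i_loop (0,0)).2 := hcur hloop
      -- position i can lie inside span j only for j = i_loop
      have honly : ∀ j, j < spans.length → j ≠ i_loop →
          ¬((spans.getD j (0,0)).1 ≤ i ∧ i ≤ (spans.getD j (0,0)).2) := by
        intro j hj hne hcontra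
        obtain ⟨hA, hB⟩ := hcontra
        rcases Nat.lt_or_ge j i_loop with h | h
        · have := hpast j h; omega
        · have hj1 : i_loop ≤ j - 1 := by omega
          have hm := hmono (j-1) (by omega)
          have hmm := hi_mono spans hlohi hmono i_loop (j-1) hj1 (by omega)
          have hjj : j - 1 + 1 = j := by omega
          rw [hjj] at hm
          omega
      -- the rest of the loop, as a function of the state after this iteration
      have main : ∀ (ids2 : List (List Int)) (resid2 : Int), ids2.length = spans.length →
          (if (if i = (spans.getD i_loop (0,0)).2 then i_loop + 1 else i_loop) = spans.length
           then ids2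
           else aGo spans rest (i+1) resid2
                  (if i = (spans.getD i_loop (0,0)).2 then i_loop + 1 else i_loop) ids2)
          = List.zipWith (fun l sp =>
              l ++ ((bIndex rest (i+1) resid2).filter (fun p => sp.1 ≤ p.1 ∧ p.1 ≤ sp.2)).map Prod.snd)
              ids2 spans := by
        intro ids2 resid2 hlen2
        by_cases hend : i = (spans.getD i_loop (0,0)).2
        · rw [if_pos hend]
          have hpast' : ∀ j, j < i_loop + 1 → (spans.getD j (0,0)).2 < i + 1 := by
            intro j hj
            rcases Nat.lt_or_ge j i_loop with h | h
            · have := hpast j h; omega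
            · have : j = i_loop := by omega
              subst this; omega
          by_cases hfin : i_loop + 1 = spans.length
          · rw [if_pos hfin]
            exact (zip_all_empty spans rest (i+1) resid2 ids2 hlen2
              (fun j hj => hpast' j (by omega))).symm
          · rw [if_neg hfin]
            refine ih (i+1) resid2 (i_loop+1) ids2 hlen2 (by omega) (by omega) hpast' ?_
            intro h
            have h1 := hmono i_loop h
            have h2 := hlohi (i_loop+1) h
            omega
        · rw [if_neg hend, if_neg hloopfull]
          refine ih (i+1) resid2 i_loop ids2 hlen2 hle (by omega) ?_ ?_
          · intro j hj; have := hpast j hj; omega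
          · intro _; omega
      by_cases hgap : c = '-'
      · -- gap: nothing recorded, resid unchanged
        rw [show bIndex (c :: rest) i resid = bIndex rest (i + 1) resid from by
          simp [bIndex, hgap]]
        simp only [aGo]
        rw [if_neg (show ¬((spans.getD i_loop (0,0)).1 ≤ i ∧ i ≤ (spans.getD i_loop (0,0)).2 ∧ c ≠ '-') from
              fun h => h.2.2 hgap)]
        rw [if_neg (show ¬(c ≠ '-') from fun h => h hgap)]
        rw [add_zero]
        exact main ids resid hlen
      · -- non-gap: the index gains the head (i, resid+1)
        rw [show bIndex (c :: rest) i resid = (i, resid + 1) :: bIndex rest (i + 1) (resid + 1) from by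
          simp [bIndex, hgap]]
        by_cases hin : (spans.getD i_loop (0,0)).1 ≤ i ∧ i ≤ (spans.getD i_loop (0,0)).2
        · -- inside the current span: A appends, B's filter keeps the head exactly at i_loop
          have hin' := hin
          rw [List.getD_eq_getElem _ _ hloop] at hin'
          have hstep :
              List.zipWith (fun l sp =>
                  l ++ (((i, resid + 1) :: bIndex rest (i+1) (resid+1)).filter
                    (fun p => sp.1 ≤ p.1 ∧ p.1 ≤ sp.2)).map Prod.snd) ids spans
              = List.zipWith (fun l sp =>
                  l ++ ((bIndex rest (i+1) (resid+1)).filter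
                    (fun p => sp.1 ≤ p.1 ∧ p.1 ≤ sp.2)).map Prod.snd)
                  (ids.modify i_loop (fun l => l ++ [resid + 1])) spans := by
            apply List.ext_getElem
            · simp [List.length_zipWith, List.length_modify]
            · intro j h1 h2
              have hj : j < spans.length := by
                simpa [List.length_zipWith, List.length_modify, hlen] using h2
              by_cases hji : i_loop = j
              · subst hji
                simp [List.getElem_zipWith, List.filter_cons,
                  hin'.1, hin'.2]
              · have hne := honly j hj (fun h => hji h.symm)
                rw [List.getD_eq_getElem _ _ hj] at hne
                simp [List.getElem_zipWith, List.filter_cons, hji, hne]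
          rw [hstep]
          simp only [aGo]
          rw [if_pos (show c ≠ '-' from hgap)]
          rw [if_pos (show (spans.getD i_loop (0,0)).1 ≤ i ∧ i ≤ (spans.getD i_loop (0,0)).2 ∧ c ≠ '-' from
                ⟨hin.1, hin.2, hgap⟩)]
          exact main (ids.modify i_loop (fun l => l ++ [resid + 1])) (resid + 1)
            (by rw [List.length_modify]; exact hlen)
        · -- outside every span: the head is filtered out everywhere and A appends nothing
          have hstep :
              List.zipWith (fun l sp =>
                  l ++ (((i, resid + 1) :: bIndex rest (i+1) (resid+1)).filter
                    (fun p => sp.1 ≤ p.1 ∧ p.1 ≤ sp.2)).map Prod.snd) ids spans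
              = List.zipWith (fun l sp =>
                  l ++ ((bIndex rest (i+1) (resid+1)).filter
                    (fun p => sp.1 ≤ p.1 ∧ p.1 ≤ sp.2)).map Prod.snd) ids spans := by
            apply List.ext_getElem
            · simp [List.length_zipWith]
            · intro j h1 h2
              have hj : j < spans.length := by
                simpa [List.length_zipWith, hlen] using h2
              have hne : ¬(spans[j].1 ≤ i ∧ i ≤ spans[j].2) := by
                by_cases hji : j = i_loop
                · subst hji
                  rwa [List.getD_eq_getElem _ _ hj] at hin
                · have := honly j hj hji
                  rwa [List.getD_eq_getElem _ _ hj] at this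
              simp [List.getElem_zipWith, List.filter_cons, hne]
          rw [hstep]
          simp only [aGo]
          rw [if_pos (show c ≠ '-' from hgap)]
          rw [if_neg (show ¬((spans.getD i_loop (0,0)).1 ≤ i ∧ i ≤ (spans.getD i_loop (0,0)).2 ∧ c ≠ '-') from
                fun h => hin ⟨h.1, h.2.1⟩)]
          exact main ids (resid + 1) hlen

-- ===== VERDICT (by name: the statement is the Claim_ definition above) =====
theorem get_cdr_ids_spec : Claim_equal_get_cdr_ids := by
  intro s b _
  show get_cdr_ids s b = get_cdr_ids_alt s b
  cases b
  · exact aGo_eq [((24:Int),(42:Int)),(58,72),(107,138)]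
      (by intro j hj; simp at hj; interval_cases j <;> decide)
      (by intro j hj; simp at hj; rcases j with _ | (_ | j) <;> first | decide | omega)
      s.toList 1 0 0 [[],[],[]] rfl (by omega) (by omega)
      (fun j hj => absurd hj (Nat.not_lt_zero j))
      (by intro _; decide)
  · exact aGo_eq [((32:Int),(42:Int)),(57,76),(109,138)]
      (by intro j hj; simp at hj; interval_cases j <;> decide)
      (by intro j hj; simp at hj; rcases j with _ | (_ | j) <;> first | decide | omega)
      s.toList 1 0 0 [[],[],[]] rfl (by omega) (by omega)
      (fun j hj => absurd hj (Nat.not_lt_zero j))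
      (by intro _; decide)
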